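-- pv_equiv track=rewrite | github.com/Xinglab/scCirRL-seq | nanohunter/nh_bulk_allele_specific_splicing.py | get_hap
-- ===== SOURCE A (Python) =====
-- from collections import defaultdict as dd
--
-- def get_hap(qnames, read_to_hap, trans_id, gene_name):
--     hap_to_read_cnt = dd(lambda: 0)
--     for qname in qnames.rsplit(','):
--         if qname in read_to_hap:
--             hap_to_read_cnt[read_to_hap[qname]] += 1
--
--     hap_to_read_cnt = dict(sorted(hap_to_read_cnt.items(), key=lambda d: -d[1]))
--     if len(hap_to_read_cnt) == 0:  # no hap
--         return 'none'
--     elif len(hap_to_read_cnt) > 1:  # 2 haps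
--         if list(hap_to_read_cnt.values())[0] > list(hap_to_read_cnt.values())[1]:
--             return list(hap_to_read_cnt.keys())[0]
--         else:
--             return 'none'
--     else:  # 1 hap
--         return list(hap_to_read_cnt.keys())[0]
-- ===== SOURCE B (Python) =====
-- def get_hap(qnames, read_to_hap, trans_id, gene_name):
--     # Same counting scan, but pick the unique argmax in one pass instead of
--     # sorting the counts and comparing the top two.
--     cnt = {}
--     for qname in qnames.split(','):
--         hap = read_to_hap.get(qname)
--         if hap is not None:
--             cnt[hap] = cnt.get(hap, 0) + 1
--     best_hap, best_cnt, tie = 'none', 0, False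
--     for hap, c in cnt.items():
--         if c > best_cnt:
--             best_hap, best_cnt, tie = hap, c, False
--         elif c == best_cnt:
--             tie = True
--     return 'none' if tie else best_hap
-- ===== Notes on version B (the rewrite author's own statement) =====
-- stated objective: simpler
-- what changed: Replaced 'sort the haplotype counts descending, rebuild a dict, and compare the top two entries' by a single pass over the counts that tracks the maximum count and whether it is tied, returning the unique argmax or 'none'.
import Mathlib
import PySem

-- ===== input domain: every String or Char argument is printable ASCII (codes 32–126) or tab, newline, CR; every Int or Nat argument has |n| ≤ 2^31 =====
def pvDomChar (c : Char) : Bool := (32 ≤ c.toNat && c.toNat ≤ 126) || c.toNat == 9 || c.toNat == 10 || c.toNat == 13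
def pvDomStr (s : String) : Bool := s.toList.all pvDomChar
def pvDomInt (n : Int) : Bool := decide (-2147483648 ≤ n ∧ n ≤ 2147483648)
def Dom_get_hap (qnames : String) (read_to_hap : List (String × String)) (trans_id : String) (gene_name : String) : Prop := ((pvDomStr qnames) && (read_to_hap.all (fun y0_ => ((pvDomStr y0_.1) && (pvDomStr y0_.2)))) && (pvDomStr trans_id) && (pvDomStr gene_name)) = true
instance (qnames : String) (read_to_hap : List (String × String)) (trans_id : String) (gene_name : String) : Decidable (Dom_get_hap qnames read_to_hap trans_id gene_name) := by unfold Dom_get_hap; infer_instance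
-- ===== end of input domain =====

-- B differs from A only in how the dominant haplotype is selected from the counts:
-- a single max/tie scan instead of sorting the counts and comparing the top two.

-- ===== PORT A =====
-- A: count reads per haplotype, sort items by descending count, compare positions 0 and 1.
def get_hap (qnames : String) (read_to_hap : List (String × String)) (trans_id : String) (gene_name : String) : String :=
  let d := PySem.Dict.mk read_to_hap
  let hap_to_read_cnt : PySem.Dict String Int :=
    ((PySem.Str.split? qnames ",").getD []).foldl (fun c q =>
      match d.get? q with
      | some h => c.modify h 0 (· + 1)
      | none => c) PySem.Dict.empty
  let s := PySem.List.sorted hap_to_read_cnt.items (fun p => -p.2) false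
  match s with
  | [] => "none"                                 -- no hap
  | [p] => p.1                                   -- 1 hap
  | p :: q :: _ => if q.2 < p.2 then p.1 else "none"   -- values[0] > values[1] ?

-- ===== PORT B =====
-- one step of B's scan over the count items: track best hap, best count, tie flag
def bStep (st : String × Int × Bool) (p : String × Int) : String × Int × Bool :=
  if st.2.1 < p.2 then (p.1, p.2, false)
  else if p.2 = st.2.1 then (st.1, st.2.1, true)
  else st

def get_hap_alt (qnames : String) (read_to_hap : List (String × String)) (trans_id : String) (gene_name : String) : String :=
  let d := PySem.Dict.mk read_to_hap
  let cnt : PySem.Dict String Int :=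
    ((PySem.Str.split? qnames ",").getD []).foldl (fun c q =>
      match d.get? q with
      | some h => c.insert h (c.getD h 0 + 1)
      | none => c) PySem.Dict.empty
  let r := cnt.items.foldl bStep ("none", 0, false)
  if r.2.2 then "none" else r.1

-- ===== PRECONDITION & SPEC =====
def Spec_get_hap (qnames : String) (read_to_hap : List (String × String)) (trans_id : String) (gene_name : String) (out : String) : Prop := out = get_hap_alt qnames read_to_hap trans_id gene_name
instance (qnames : String) (read_to_hap : List (String × String)) (trans_id : String) (gene_name : String) (out : String) : Decidable (Spec_get_hap qnames read_to_hap trans_id gene_name out) := by unfold Spec_get_hap; infer_instance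

-- ===== CLAIM (what is proved, stated in full; the proofs are below) =====
def Claim_equal_get_hap : Prop := ∀ (qnames : String) (read_to_hap : List (String × String)) (trans_id : String) (gene_name : String), Dom_get_hap qnames read_to_hap trans_id gene_name → Spec_get_hap qnames read_to_hap trans_id gene_name (get_hap qnames read_to_hap trans_id gene_name)

-- ===== LEMMAS AND PROOFS =====

-- the maximum value in a list of (hap, count) pairs, floored at 0
def maxVal (l : List (String × Int)) : Int := l.foldl (fun a p => max a p.2) 0

theorem maxVal_append (l : List (String × Int)) (q : String × Int) :
    maxVal (l ++ [q]) = max (maxVal l) q.2 := by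
  simp [maxVal, List.foldl_append]

theorem le_maxVal (l : List (String × Int)) (p : String × Int) (hp : p ∈ l) : p.2 ≤ maxVal l := by
  induction l using List.reverseRecOn with
  | nil => simp at hp
  | append_singleton t q ih =>
    rw [maxVal_append]
    rcases List.mem_append.1 hp with h | h
    · exact le_trans (ih h) (le_max_left _ _)
    · simp at h; subst h; exact le_max_right _ _

-- the maximum is attained by some element when the list is nonempty
theorem maxVal_attained (l : List (String × Int)) (hpos : ∀ p ∈ l, 1 ≤ p.2) (hne : l ≠ []) :
    ∃ m ∈ l, m.2 = maxVal l := by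
  induction l using List.reverseRecOn with
  | nil => exact absurd rfl hne
  | append_singleton s r ih =>
    rw [maxVal_append]
    rcases le_or_gt (maxVal s) r.2 with h1 | h1
    · exact ⟨r, by simp, by omega⟩
    · have hsne : s ≠ [] := by
        intro h; subst h
        have := hpos r (by simp)
        simp [maxVal] at h1; omega
      obtain ⟨m, hm, hm2⟩ := ih (fun p hp => hpos p (List.mem_append_left _ hp)) hsne
      exact ⟨m, List.mem_append_left _ hm, by omega⟩

-- B's scan computes: first element attaining the max, the max, and whether it is tied
theorem bFold_spec (l : List (String × Int)) (hpos : ∀ p ∈ l, 1 ≤ p.2) :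
    l.foldl bStep ("none", 0, false)
      = match l.find? (fun p => p.2 = maxVal l) with
        | none => ("none", 0, false)
        | some m => (m.1, maxVal l, decide (2 ≤ (l.filter (fun p => p.2 = maxVal l)).length)) := by
  induction l using List.reverseRecOn with
  | nil => rfl
  | append_singleton t q ih =>
    have hposT : ∀ p ∈ t, 1 ≤ p.2 := fun p hp => hpos p (List.mem_append_left _ hp)
    have hq : 1 ≤ q.2 := hpos q (by simp)
    rw [List.foldl_append, List.foldl_cons, List.foldl_nil, ih hposT, maxVal_append]
    rcases lt_trichotomy (maxVal t) q.2 with hlt | heq | hgt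
    · -- q strictly exceeds everything before it
      have hmax : max (maxVal t) q.2 = q.2 := max_eq_right (le_of_lt hlt)
      have hnone_t : ∀ p ∈ t, ¬ (p.2 = q.2) := by
        intro p hp h
        exact absurd (le_maxVal t p hp) (by omega)
      have hfind : (t ++ [q]).find? (fun p => p.2 = q.2) = some q := by
        rw [List.find?_append]
        have h0 : t.find? (fun p => p.2 = q.2) = none := by
          rw [List.find?_eq_none]; intro p hp; simpa using hnone_t p hp
        simp [h0]
      have hfilt : (t ++ [q]).filter (fun p => p.2 = q.2) = [q] := by
        rw [List.filter_append]
        have h0 : t.filter (fun p => p.2 = q.2) = [] := by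
          rw [List.filter_eq_nil_iff]; intro p hp; simpa using hnone_t p hp
        simp [h0]
      rw [hmax, hfind, hfilt]
      cases hft : t.find? (fun p => p.2 = maxVal t) with
      | none =>
        simp only [bStep]
        have h0 : (0 : Int) < q.2 := by omega
        simp [h0]
      | some m =>
        have hm2 : m.2 = maxVal t := by simpa using List.find?_some hft
        simp only [bStep]
        simp [hm2, hlt]
    · -- q ties the previous maximum
      have hmax : max (maxVal t) q.2 = maxVal t := by omega
      have htne : t ≠ [] := by
        intro h; subst h; simp [maxVal] at heq; omega
      obtain ⟨m0, hm0, hm02⟩ := maxVal_attained t hposT htne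
      have hft : ∃ m, t.find? (fun p => p.2 = maxVal t) = some m := by
        have h := List.find?_isSome (xs := t) (p := fun p : String × Int => decide (p.2 = maxVal t))
        rw [Option.isSome_iff_exists] at h
        exact h.2 ⟨m0, hm0, by simpa using hm02⟩
      obtain ⟨m, hfm⟩ := hft
      have hm2 : m.2 = maxVal t := by simpa using List.find?_some hfm
      have hfind : (t ++ [q]).find? (fun p => p.2 = max (maxVal t) q.2) = some m := by
        rw [hmax, List.find?_append, hfm]; rfl
      have hfiltpos : 1 ≤ (t.filter (fun p => p.2 = maxVal t)).length := by
        have hmem : m0 ∈ t.filter (fun p => p.2 = maxVal t) :=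
          List.mem_filter.2 ⟨hm0, by simpa using hm02⟩
        exact List.length_pos_of_mem hmem
      have hfilt : ((t ++ [q]).filter (fun p => p.2 = max (maxVal t) q.2)).length
          = (t.filter (fun p => p.2 = maxVal t)).length + 1 := by
        rw [hmax, List.filter_append]
        simp [heq]
      rw [hfind, hfilt, hfm, hmax]
      have hnlt : ¬ (maxVal t < q.2) := by omega
      have h2 : 2 ≤ (t.filter (fun p => p.2 = maxVal t)).length + 1 := by omega
      simp only [bStep]
      simp [hnlt, hm2, heq, h2]
      exact heq ▸ hfiltpos
    · -- q is below the previous maximum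
      have hmax : max (maxVal t) q.2 = maxVal t := by omega
      have hqne : ¬ (q.2 = maxVal t) := by omega
      rw [hmax]
      have hfind : (t ++ [q]).find? (fun p => p.2 = maxVal t)
          = t.find? (fun p => p.2 = maxVal t) := by
        rw [List.find?_append]
        cases hft : t.find? (fun p => p.2 = maxVal t) with
        | none => simp [hqne]
        | some m => simp
      have hfilt : (t ++ [q]).filter (fun p => p.2 = maxVal t)
          = t.filter (fun p => p.2 = maxVal t) := by
        rw [List.filter_append]; simp [hqne]
      rw [hfind, hfilt]
      cases hft : t.find? (fun p => p.2 = maxVal t) with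
      | none =>
        exfalso
        have htne : t ≠ [] := by
          intro h; subst h; simp [maxVal] at hgt; omega
        obtain ⟨m, hm, hm2⟩ := maxVal_attained t hposT htne
        rw [List.find?_eq_none] at hft
        exact hft m hm (by simpa using hm2)
      | some m =>
        have hm2 : m.2 = maxVal t := by simpa using List.find?_some hft
        have hnlt : ¬ (maxVal t < q.2) := by omega
        simp only [bStep]
        simp [hnlt, hqne]

-- string form of the selection both programs compute
def specStr (l : List (String × Int)) : String :=
  match l.find? (fun p => p.2 = maxVal l) with
  | none => "none"
  | some m => if 2 ≤ (l.filter (fun p => p.2 = maxVal l)).length then "none" else m.1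

theorem bSel_eq_specStr (l : List (String × Int)) (hpos : ∀ p ∈ l, 1 ≤ p.2) :
    (if (l.foldl bStep ("none", 0, false)).2.2 then "none"
     else (l.foldl bStep ("none", 0, false)).1) = specStr l := by
  rw [bFold_spec l hpos, specStr]
  cases hft : l.find? (fun p => p.2 = maxVal l) with
  | none => simp
  | some m =>
    by_cases h2 : 2 ≤ (l.filter (fun p => p.2 = maxVal l)).length <;> simp [h2]

theorem maxVal_le (l : List (String × Int)) (b : Int) (hb : 0 ≤ b)
    (h : ∀ p ∈ l, p.2 ≤ b) : maxVal l ≤ b := by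
  induction l using List.reverseRecOn with
  | nil => simpa [maxVal]
  | append_singleton t q ih =>
    rw [maxVal_append]
    have h1 := ih (fun p hp => h p (List.mem_append_left _ hp))
    have h2 := h q (by simp)
    omega

theorem aSel_eq_specStr (l : List (String × Int)) (hpos : ∀ p ∈ l, 1 ≤ p.2) :
    (match PySem.List.sorted l (fun p => -p.2) false with
     | [] => "none"
     | [p] => p.1
     | p :: q :: _ => if q.2 < p.2 then p.1 else "none") = specStr l := by
  have hperm := PySem.List.sorted_perm (xs := l) (key := fun p => -p.2) (rev := false)
  cases hs : PySem.List.sorted l (fun p => -p.2) false with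
  | nil =>
    have hl : l = [] := by
      have := PySem.List.sorted_eq_nil_iff (xs := l) (key := fun p => -p.2) (rev := false)
      exact this.1 hs
    subst hl; rfl
  | cons p t =>
    rw [hs] at hperm
    have hpmem : p ∈ l := hperm.mem_iff.1 (by simp)
    have hple : ∀ y ∈ l, y.2 ≤ p.2 := by
      intro y hy
      have := PySem.List.key_head_sorted_le (xs := l) (key := fun p => -p.2) hs y hy
      simpa using this
    have hmax : maxVal l = p.2 := by
      have h1 := le_maxVal l p hpmem
      have h2 := maxVal_le l p.2 (le_trans (by omega) (hpos p hpmem)) hple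
      omega
    have hpw := PySem.List.sorted_pairwise (xs := l) (key := fun p => -p.2)
    rw [hs] at hpw
    cases t with
    | nil =>
      -- l is a permutation of [p], hence l = [p]
      have hl : l = [p] := List.perm_singleton.1 hperm.symm
      subst hl
      simp only [specStr, hmax]
      have : (fun pr : String × Int => decide (pr.2 = p.2)) p = true := by simp
      simp [List.find?, List.filter]
    | cons q rest =>
      have hq2 : q.2 ≤ p.2 := by
        have := (List.pairwise_cons.1 hpw).1 q (by simp)
        simpa using this
      by_cases hlt : q.2 < p.2
      · -- unique maximum: only p attains p.2
        have hrest : ∀ r ∈ rest, r.2 ≤ q.2 := by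
          intro r hr
          have := (List.pairwise_cons.1 (List.pairwise_cons.1 hpw).2).1 r hr
          simpa using this
        have hfilt_s : (p :: q :: rest).filter (fun pr => pr.2 = maxVal l) = [p] := by
          rw [hmax]
          have hqf : (decide (q.2 = p.2)) = false := by
            simp only [decide_eq_false_iff_not]; omega
          have h0 : rest.filter (fun pr => decide (pr.2 = p.2)) = [] := by
            rw [List.filter_eq_nil_iff]
            intro r hr
            have h1 := hrest r hr
            simp only [decide_eq_true_eq]
            omega
          simp only [List.filter_cons]
          simp [hqf, h0]
        have hfilt_len : (l.filter (fun pr => pr.2 = maxVal l)).length = 1 := by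
          have h2 := (hperm.symm.filter (fun pr : String × Int => decide (pr.2 = maxVal l))).length_eq
          rw [hfilt_s] at h2
          exact h2
        have hfsome : ∃ m, l.find? (fun pr => pr.2 = maxVal l) = some m := by
          have := List.find?_isSome (xs := l) (p := fun pr : String × Int => decide (pr.2 = maxVal l))
          rw [Option.isSome_iff_exists] at this
          exact this.2 ⟨p, hpmem, by simp [hmax]⟩
        obtain ⟨m, hfm⟩ := hfsome
        have hmfilt : m ∈ l.filter (fun pr => pr.2 = maxVal l) := by
          refine List.mem_filter.2 ⟨List.mem_of_find?_eq_some hfm, ?_⟩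
          have hpm := List.find?_some hfm
          exact hpm
        have hpfilt : p ∈ l.filter (fun pr => pr.2 = maxVal l) :=
          List.mem_filter.2 ⟨hpmem, by simp [hmax]⟩
        have hmp : m = p := by
          rcases List.length_eq_one_iff.1 hfilt_len with ⟨x, hx⟩
          rw [hx] at hmfilt hpfilt
          simp at hmfilt hpfilt
          rw [hmfilt, hpfilt]
        simp only [specStr, hfm, hfilt_len, hmp]
        simp [hlt]
      · -- tie at the top: both p and q attain the maximum
        have hq2' : q.2 = p.2 := by omega
        have hqmem : q ∈ l := hperm.mem_iff.1 (by simp)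
        have hfilt_len : 2 ≤ (l.filter (fun pr => pr.2 = maxVal l)).length := by
          have := (hperm.symm.filter (fun pr : String × Int => decide (pr.2 = maxVal l))).length_eq
          have hsub : 2 ≤ ((p :: q :: rest).filter (fun pr => pr.2 = maxVal l)).length := by
            simp only [List.filter_cons]
            simp [hmax, hq2']
          omega
        cases hft : l.find? (fun pr => pr.2 = maxVal l) with
        | none => simp [specStr, hft, hlt]
        | some m => simp [specStr, hft, hfilt_len, hlt]

-- counting folds of the two ports both equal Counter of the successfully-looked-up haps
theorem cntA_eq (d : PySem.Dict String String) (xs : List String) :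
    xs.foldl (fun (c : PySem.Dict String Int) q => match d.get? q with
      | some h => c.modify h 0 (· + 1)
      | none => c) PySem.Dict.empty
    = PySem.Dict.counter (xs.filterMap d.get?) := by
  suffices h : ∀ (ys : List String) (init : PySem.Dict String Int),
      ys.foldl (fun (c : PySem.Dict String Int) q => match d.get? q with
        | some h => c.modify h 0 (· + 1)
        | none => c) init
      = (ys.filterMap d.get?).foldl (fun c x => c.modify x 0 (· + 1)) init by
    exact (h xs PySem.Dict.empty).trans (PySem.Dict.counter_eq_foldl _).symm
  intro ys
  induction ys with
  | nil => intro init; rfl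
  | cons x t ih =>
    intro init
    cases hx : d.get? x <;> simp [hx, ih]

theorem cntB_eq (d : PySem.Dict String String) (xs : List String) :
    xs.foldl (fun (c : PySem.Dict String Int) q => match d.get? q with
      | some h => c.insert h (c.getD h 0 + 1)
      | none => c) PySem.Dict.empty
    = PySem.Dict.counter (xs.filterMap d.get?) := by
  suffices h : ∀ (ys : List String) (init : PySem.Dict String Int),
      ys.foldl (fun (c : PySem.Dict String Int) q => match d.get? q with
        | some h => c.insert h (c.getD h 0 + 1)
        | none => c) init
      = (ys.filterMap d.get?).foldl (fun c x => c.insert x (c.getD x 0 + 1)) init by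
    rw [h xs PySem.Dict.empty]
    exact PySem.Dict.foldl_insert_getD_add_one_eq_counter _
  intro ys
  induction ys with
  | nil => intro init; rfl
  | cons x t ih =>
    intro init
    cases hx : d.get? x <;> simp [hx, ih]

theorem counter_items_pos (hs : List String) :
    ∀ p ∈ (PySem.Dict.counter hs).items, 1 ≤ p.2 := by
  intro p hp
  rw [PySem.Dict.items_counter] at hp
  obtain ⟨k, hk, hkp⟩ := List.mem_map.1 hp
  have hkmem : k ∈ hs := (PySem.Set.mem_ofList _ _).1 hk
  have : 0 < hs.count k := List.count_pos_iff.2 hkmem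
  rw [← hkp]
  simp
  omega

-- ===== VERDICT (by name: the statement is the Claim_ definition above) =====
theorem get_hap_spec : Claim_equal_get_hap := by
  intro qnames read_to_hap trans_id gene_name _hdom
  unfold Spec_get_hap get_hap get_hap_alt
  simp only [cntA_eq, cntB_eq]
  have hpos := counter_items_pos (((PySem.Str.split? qnames ",").getD []).filterMap (PySem.Dict.mk read_to_hap).get?)
  rw [aSel_eq_specStr _ hpos, bSel_eq_specStr _ hpos]
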